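-- pv_equiv track=rewrite | github.com/trelovodracir/my_real_name | main.py | inverter_nome
-- ===== SOURCE A (Python) =====
-- def inverter_nome(nome_invertido: str) -> str:
--     """
--     Função que recebe um nome invertido, reverte a ordem das palavras
--     e restaura as palavras para a forma correta com a primeira letra maiúscula.
--
--     Parâmetros:
--         nome_invertido (str): O nome com as palavras invertidas.
--
--     Retorna:
--         str: O nome original, com a ordem correta das palavras e com a
--         primeira letra maiúscula.
--     """
--     if not nome_invertido:
--         raise ValueError("O nome fornecido não pode ser vazio.")
--
--     # Divide o nome em palavras e inverte a ordem delas
--     palavras = nome_invertido.split()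
--     palavras_invertidas = palavras[::-1]
--
--     # Inverte cada palavra individualmente e capitaliza a primeira letra
--     palavras_capitalizadas = [
--         palavra[::-1].capitalize() for palavra in palavras_invertidas
--     ]
--     nome_original = " ".join(palavras_capitalizadas)
--
--     return nome_original
-- ===== SOURCE B (Python) =====
-- def inverter_nome(nome_invertido: str) -> str:
--     """Reverse word order and un-reverse/capitalize each word via ONE whole-string
--     reversal: reversing the full string already yields the words un-reversed and
--     in the original order, so a single split/capitalize/join finishes the job."""
--     if not nome_invertido:
--         raise ValueError("O nome fornecido não pode ser vazio.")
--     return " ".join(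
--         palavra.capitalize() for palavra in nome_invertido[::-1].split()
--     )
-- ===== Notes on version B (the rewrite author's own statement) =====
-- stated objective: simpler
-- what changed: A reverses the word list and then reverses each word separately; B reverses the whole string once, so a single split/capitalize/join yields the same result.
import Mathlib
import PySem

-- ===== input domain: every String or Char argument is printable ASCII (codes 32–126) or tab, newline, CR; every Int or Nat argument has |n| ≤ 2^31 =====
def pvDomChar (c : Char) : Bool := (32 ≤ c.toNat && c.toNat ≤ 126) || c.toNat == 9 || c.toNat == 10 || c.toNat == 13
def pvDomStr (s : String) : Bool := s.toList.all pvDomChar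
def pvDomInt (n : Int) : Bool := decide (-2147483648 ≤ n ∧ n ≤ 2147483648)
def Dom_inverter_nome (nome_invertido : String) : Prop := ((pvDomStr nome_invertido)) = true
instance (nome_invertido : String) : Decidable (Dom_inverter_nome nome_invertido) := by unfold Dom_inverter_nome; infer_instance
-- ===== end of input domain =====

-- B replaces A's two separate reversals (word list + each word) by ONE whole-string
-- reversal followed by split/capitalize/join (objective: simpler).

-- shared helper: exact port of Python's str.capitalize on the ASCII domain
-- (first char uppercased, the rest lowercased)
def capChars (l : List Char) : List Char :=
  match l with
  | [] => []
  | c :: rest => PySem.Chars.upperChar c :: rest.map PySem.Chars.lowerChar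

def pyCapitalize (t : String) : String := String.ofList (capChars t.toList)

-- ===== PORT A =====
def inverter_nome (nome_invertido : String) : String :=
  -- 'if not nome_invertido: raise ValueError(…)' — excluded by Pre_inverter_nome
  let palavras := PySem.Str.split₀ nome_invertido
  let palavras_invertidas := (PySem.List.slice? palavras none none (-1)).getD []
  let palavras_capitalizadas := palavras_invertidas.map
    (fun palavra => pyCapitalize ((PySem.Str.slice? palavra none none (-1)).getD ""))
  PySem.Str.join " " palavras_capitalizadas

-- ===== PORT B =====
def inverter_nome_alt (nome_invertido : String) : String :=
  -- the empty-string guard raises in Source B — excluded by Pre_inverter_nome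
  let reversed_all := (PySem.Str.slice? nome_invertido none none (-1)).getD ""
  PySem.Str.join " " ((PySem.Str.split₀ reversed_all).map pyCapitalize)

-- ===== PRECONDITION & SPEC =====
-- A (and Source B) raise ValueError exactly on the empty string.
def Pre_inverter_nome (nome_invertido : String) : Prop := nome_invertido ≠ ""
instance (nome_invertido : String) : Decidable (Pre_inverter_nome nome_invertido) := by
  unfold Pre_inverter_nome; infer_instance
def pvWitness_inverter_nome : String := ("odracir avlis")

def Spec_inverter_nome (nome_invertido : String) (out : String) : Prop := out = inverter_nome_alt nome_invertido
instance (nome_invertido : String) (out : String) : Decidable (Spec_inverter_nome nome_invertido out) := by unfold Spec_inverter_nome; infer_instance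

-- ===== CLAIM (what is proved, stated in full; the proofs are below) =====
def Claim_equal_inverter_nome : Prop := ∀ (nome_invertido : String), Dom_inverter_nome nome_invertido → Pre_inverter_nome nome_invertido → Spec_inverter_nome nome_invertido (inverter_nome nome_invertido)

-- ===== LEMMAS AND PROOFS =====

-- non-space predicate
def nsp (c : Char) : Bool := !PySem.Chars.isspace c

-- reference "words" function: the words of cs, left to right
def wds : List Char → List (List Char)
  | [] => []
  | c :: cs =>
      if PySem.Chars.isspace c then wds cs
      else (c :: cs.takeWhile nsp) :: wds (cs.dropWhile nsp)
  termination_by l => l.length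
  decreasing_by
    all_goals
      have := List.length_dropWhile_le (p := nsp) (l := cs)
      simp only [List.length_cons]
      omega

theorem wds_allns (l : List Char) (h : ∀ c ∈ l, PySem.Chars.isspace c = false) :
    wds l = if l = [] then [] else [l] := by
  cases l with
  | nil => simp [wds]
  | cons c cs =>
    have hc : PySem.Chars.isspace c = false := h c (by simp)
    have ht : cs.takeWhile nsp = cs :=
      List.takeWhile_eq_self_iff.mpr (fun x hx => by simp [nsp, h x (by simp [hx])])
    have hd : cs.dropWhile nsp = [] :=
      List.dropWhile_eq_nil_iff.mpr (fun x hx => by simp [nsp, h x (by simp [hx])])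
    simp [wds, hc, ht, hd]

theorem dropWhile_head_false {α : Type} (p : α → Bool) (l : List α) (x : α) (xs : List α)
    (h : List.dropWhile p l = x :: xs) : p x = false := by
  induction l with
  | nil => simp at h
  | cons a as ih =>
    by_cases hp : p a
    · exact ih (by simpa [List.dropWhile, hp] using h)
    · rw [List.dropWhile_cons_of_neg (by simpa using hp)] at h
      injection h with h1 h2
      subst h1; simpa using hp

-- splitting the word list at a space character
theorem wds_split (s : Char) (hs : PySem.Chars.isspace s = true) (m : List Char) :
    ∀ l, wds (l ++ s :: m) = wds l ++ wds m := by
  intro l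
  induction l using wds.induct with
  | case1 => simp [wds, hs]
  | case2 c cs hc ih =>
    rw [List.cons_append, wds, if_pos hc, wds, if_pos hc]
    exact ih
  | case3 c cs hc ih =>
    by_cases hall : ∀ x ∈ cs, nsp x = true
    · have ht : cs.takeWhile nsp = cs := List.takeWhile_eq_self_iff.mpr hall
      have hd : cs.dropWhile nsp = [] := List.dropWhile_eq_nil_iff.mpr hall
      have h1 : (cs ++ s :: m).takeWhile nsp = cs := by
        rw [List.takeWhile_append, ht]
        simp [List.takeWhile, nsp, hs]
      have h2 : (cs ++ s :: m).dropWhile nsp = s :: m := by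
        rw [List.dropWhile_append, hd]
        simp [List.dropWhile, nsp, hs]
      simp [wds, hc, h1, h2, ht, hd, hs]
    · have hne : cs.takeWhile nsp ≠ cs := fun hq => hall (List.takeWhile_eq_self_iff.mp hq)
      have hlen : (cs.takeWhile nsp).length ≠ cs.length := fun hq =>
        hne ((List.takeWhile_prefix (p := nsp)).eq_of_length hq)
      have hdne : cs.dropWhile nsp ≠ [] := fun hq =>
        hall (fun x hx => by
          have := List.dropWhile_eq_nil_iff.mp hq x hx
          simpa using this)
      have h1 : (cs ++ s :: m).takeWhile nsp = cs.takeWhile nsp := by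
        rw [List.takeWhile_append]; simp [hlen]
      have h2 : (cs ++ s :: m).dropWhile nsp = cs.dropWhile nsp ++ s :: m := by
        rw [List.dropWhile_append]; simp [List.isEmpty_iff, hdne]
      simp only [List.cons_append, wds, hc, h1, h2, ih]
      simp

-- the key fact: the words of the reversed string are the reversed words in reverse order
theorem wds_reverse : ∀ cs, wds cs.reverse = ((wds cs).map List.reverse).reverse := by
  intro cs
  induction cs using wds.induct with
  | case1 => simp [wds]
  | case2 c cs hc ih =>
    have : (c :: cs).reverse = cs.reverse ++ c :: [] := by simp
    rw [this, wds_split c hc [], wds]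
    simp [wds, hc, ih]
  | case3 c cs hc ih =>
    have hcs : cs = cs.takeWhile nsp ++ cs.dropWhile nsp := (List.takeWhile_append_dropWhile).symm
    have htall : ∀ x ∈ (cs.takeWhile nsp).reverse ++ [c], PySem.Chars.isspace x = false := by
      intro x hx
      rcases List.mem_append.mp hx with h | h
      · have := List.mem_takeWhile_imp (List.mem_reverse.mp h)
        simpa [nsp] using this
      · simp at h; subst h; simpa using hc
    cases hdrop : cs.dropWhile nsp with
    | nil =>
      have hall : ∀ x ∈ c :: cs, PySem.Chars.isspace x = false := by
        intro x hx
        rcases List.mem_cons.mp hx with h | h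
        · subst h; simpa using hc
        · have : nsp x = true := List.dropWhile_eq_nil_iff.mp hdrop x h
          simpa [nsp] using this
      have hallr : ∀ x ∈ (c :: cs).reverse, PySem.Chars.isspace x = false := by
        intro x hx; exact hall x (List.mem_reverse.mp hx)
      rw [wds_allns _ hallr, wds_allns _ hall]
      simp
    | cons s d' =>
      have hs : PySem.Chars.isspace s = true := by
        have := dropWhile_head_false nsp cs s d' hdrop
        simpa [nsp] using this
      -- rewrite the reversed input as  d'.reverse ++ s :: ((takeWhile).reverse ++ [c])
      have hrw : (c :: cs).reverse
          = d'.reverse ++ s :: ((cs.takeWhile nsp).reverse ++ [c]) := by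
        conv_lhs => rw [show c :: cs = c :: (cs.takeWhile nsp ++ cs.dropWhile nsp) from by rw [← hcs]]
        rw [hdrop]; simp
      -- IH, unpacked: wds d'.reverse = ((wds d').map reverse).reverse
      have hih : wds d'.reverse = ((wds d').map List.reverse).reverse := by
        rw [hdrop] at ih
        have h1 : (s :: d').reverse = d'.reverse ++ s :: [] := by simp
        rw [h1, wds_split s hs []] at ih
        simpa [wds, hs] using ih
      rw [hrw, wds_split s hs _ d'.reverse, hih,
          wds_allns ((cs.takeWhile nsp).reverse ++ [c]) htall]
      simp [wds, hc, hdrop, hs]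

-- split₀ computes wds
theorem split₀go_eq (cs : List Char) : ∀ cur acc, (∀ c ∈ cur, PySem.Chars.isspace c = false) →
    PySem.Chars.split₀.go cs cur acc = acc.reverse ++ wds (cur.reverse ++ cs) := by
  induction cs with
  | nil =>
    intro cur acc hcur
    cases cur with
    | nil => simp [PySem.Chars.split₀.go, wds]
    | cons c cur' =>
      have h2 := wds_allns (cur'.reverse ++ [c]) (by
        intro x hx
        rcases List.mem_append.mp hx with h | h
        · exact hcur x (by simp [List.mem_reverse.mp h])
        · simp at h; subst h; exact hcur x (by simp))
      simp [PySem.Chars.split₀.go, h2]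
  | cons c rest ih =>
    intro cur acc hcur
    by_cases hc : PySem.Chars.isspace c
    · have hsplit : wds (cur.reverse ++ c :: rest) = wds cur.reverse ++ wds rest :=
        wds_split c hc rest cur.reverse
      cases cur with
      | nil =>
        simpa [PySem.Chars.split₀.go, hc, hsplit, wds] using ih [] acc (by simp)
      | cons a cur' =>
        have hr : ∀ x ∈ (a :: cur').reverse, PySem.Chars.isspace x = false := by
          intro x hx; exact hcur x (List.mem_reverse.mp hx)
        rw [show PySem.Chars.split₀.go (c :: rest) (a :: cur') acc
              = PySem.Chars.split₀.go rest [] ((a :: cur').reverse :: acc) from by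
            simp [PySem.Chars.split₀.go, hc]]
        rw [ih [] ((a :: cur').reverse :: acc) (by simp)]
        rw [hsplit, wds_allns _ hr]
        simp
    · rw [show PySem.Chars.split₀.go (c :: rest) cur acc
            = PySem.Chars.split₀.go rest (c :: cur) acc from by
          simp [PySem.Chars.split₀.go, hc]]
      rw [ih (c :: cur) acc (by intro x hx; rcases List.mem_cons.mp hx with h | h
                                · subst h; simpa using hc
                                · exact hcur x h)]
      simp

theorem split₀_eq_wds (cs : List Char) : PySem.Chars.split₀ cs = wds cs := by
  have := split₀go_eq cs [] [] (by simp)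
  simpa [PySem.Chars.split₀] using this

-- ===== VERDICT (by name: the statement is the Claim_ definition above) =====
theorem inverter_nome_spec : Claim_equal_inverter_nome := by
  intro s _ _
  show inverter_nome s = inverter_nome_alt s
  unfold inverter_nome inverter_nome_alt
  simp only [PySem.Str.slice?_none_none_neg_one, PySem.List.slice?_none_none_neg_one, Option.getD_some]
  apply String.toList_inj.mp
  rw [PySem.Str.toList_join, PySem.Str.toList_join]
  congr 1
  rw [List.map_map, List.map_map]
  have hB : List.map (String.toList ∘ pyCapitalize) (PySem.Str.split₀ (String.ofList s.toList.reverse))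
      = (PySem.Chars.split₀ s.toList.reverse).map capChars := by
    have h1 : String.toList ∘ pyCapitalize = capChars ∘ String.toList := by
      funext t; simp [pyCapitalize]
    rw [h1, ← List.map_map, PySem.Str.split₀_map_toList, String.toList_ofList]
  rw [hB]
  have h1 : (String.toList ∘ fun palavra => pyCapitalize (String.ofList palavra.toList.reverse))
      = (fun w => capChars w.reverse) ∘ String.toList := by
    funext t; simp [pyCapitalize]
  rw [h1, ← List.map_map, List.map_reverse, PySem.Str.split₀_map_toList,
      List.map_reverse, split₀_eq_wds, split₀_eq_wds, wds_reverse]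
  simp [List.map_map, Function.comp_def]
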